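-- pv_equiv track=rewrite | github.com/VND2004/2A202600344-VuNhuDuc-phase2-track3-day2-memory-systems-for-agents | src/agent.py | _trim_lines
-- ===== SOURCE A (Python) =====
-- def _trim_lines(lines: list[str], budget: int) -> list[str]:
--     consumed = 0
--     selected: list[str] = []
--     for line in lines:
--         line_cost = len(line)
--         if consumed + line_cost > budget:
--             break
--         selected.append(line)
--         consumed += line_cost
--     return selected
-- ===== SOURCE B (Python) =====
-- import bisect
-- from itertools import accumulate
--
--
-- def _trim_lines(lines: list[str], budget: int) -> list[str]:
--     cumsum = list(accumulate(len(l) for l in lines))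
--     count = bisect.bisect_right(cumsum, budget)
--     return lines[:count]
-- ===== Notes on version B (the rewrite author's own statement) =====
-- stated objective: alternative
-- what changed: Replaces the running-sum loop with early break by a prefix-sum table plus a binary search (bisect_right) for the cutoff index, then a single slice.
import Mathlib
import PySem

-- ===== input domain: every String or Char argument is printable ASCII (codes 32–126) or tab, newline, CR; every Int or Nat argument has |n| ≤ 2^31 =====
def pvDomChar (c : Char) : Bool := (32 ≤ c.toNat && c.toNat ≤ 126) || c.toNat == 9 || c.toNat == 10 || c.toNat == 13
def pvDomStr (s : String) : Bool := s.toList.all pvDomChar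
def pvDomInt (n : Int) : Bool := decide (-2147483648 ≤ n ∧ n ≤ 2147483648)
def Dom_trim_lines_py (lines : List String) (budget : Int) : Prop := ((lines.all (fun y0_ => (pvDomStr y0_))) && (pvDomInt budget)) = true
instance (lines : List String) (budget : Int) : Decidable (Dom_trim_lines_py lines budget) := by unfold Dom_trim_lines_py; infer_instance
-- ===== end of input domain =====

-- B replaces A's running-sum loop with early break by a prefix-sum table and a
-- binary search (bisect_right) for the cutoff; same result, alternative structure.

-- ===== PORT A =====
-- the for-loop of _trim_lines: state (consumed, selected), break when over budget
def trimLoop (budget : Int) : List String → Int → List String → List String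
  | [], _, selected => selected
  | line :: rest, consumed, selected =>
    let line_cost := PySem.Str.len line
    if consumed + line_cost > budget then selected
    else trimLoop budget rest (consumed + line_cost) (selected ++ [line])

def trim_lines_py (lines : List String) (budget : Int) : List String :=
  trimLoop budget lines 0 []

-- ===== PORT B =====
-- itertools.accumulate(len(l) for l in lines), starting from running total `acc`
def accumLen (acc : Int) : List String → List Int
  | [] => []
  | l :: rest => (acc + PySem.Str.len l) :: accumLen (acc + PySem.Str.len l) rest

-- bisect.bisect_right(a, x): CPython's binary-search loop on [lo, hi)
def bisectGo (a : List Int) (x : Int) (lo hi : Nat) : Nat :=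
  if h : lo < hi then
    let mid := (lo + hi) / 2
    if x < a.getD mid 0 then bisectGo a x lo mid
    else bisectGo a x (mid + 1) hi
  else lo
termination_by hi - lo
decreasing_by all_goals omega

def trim_lines_py_alt (lines : List String) (budget : Int) : List String :=
  let cumsum := accumLen 0 lines
  let count := bisectGo cumsum budget 0 cumsum.length
  lines.take count  -- lines[:count] with count : Nat (exact: count ≥ 0)

-- ===== PRECONDITION & SPEC =====
def Spec_trim_lines_py (lines : List String) (budget : Int) (out : List String) : Prop := out = trim_lines_py_alt lines budget
instance (lines : List String) (budget : Int) (out : List String) : Decidable (Spec_trim_lines_py lines budget out) := by unfold Spec_trim_lines_py; infer_instance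

-- ===== CLAIM (what is proved, stated in full; the proofs are below) =====
def Claim_equal_trim_lines_py : Prop := ∀ (lines : List String) (budget : Int), Dom_trim_lines_py lines budget → Spec_trim_lines_py lines budget (trim_lines_py lines budget)

-- ===== LEMMAS AND PROOFS =====

-- number of lines A's loop keeps, starting from running total `acc`
def takeCount (budget acc : Int) : List String → Nat
  | [] => 0
  | l :: rest =>
    if acc + PySem.Str.len l > budget then 0
    else takeCount budget (acc + PySem.Str.len l) rest + 1

theorem len_nonneg (s : String) : 0 ≤ PySem.Str.len s := by
  simp [PySem.Str.len_eq]

theorem trimLoop_eq_take (budget : Int) :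
    ∀ (lines : List String) (acc : Int) (sel : List String),
      trimLoop budget lines acc sel = sel ++ lines.take (takeCount budget acc lines) := by
  intro lines
  induction lines with
  | nil => intro acc sel; simp [trimLoop, takeCount]
  | cons l rest ih =>
    intro acc sel
    by_cases h : acc + PySem.Str.len l > budget
    · simp only [PySem.Str.len_eq, String.length_toList] at h
      simp [trimLoop, takeCount, h]
    · simp only [PySem.Str.len_eq, String.length_toList] at h
      simp [trimLoop, takeCount, h, ih]

theorem accumLen_length (acc : Int) (ls : List String) :
    (accumLen acc ls).length = ls.length := by
  induction ls generalizing acc with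
  | nil => simp [accumLen]
  | cons l rest ih => simp [accumLen, ih]

theorem accumLen_lb (acc : Int) (ls : List String) :
    ∀ i, i < ls.length → acc ≤ (accumLen acc ls).getD i 0 := by
  induction ls generalizing acc with
  | nil => simp
  | cons l rest ih =>
    intro i hi
    cases i with
    | zero => have := len_nonneg l; simp only [accumLen, List.getD_cons_zero]; omega
    | succ j =>
      have := ih (acc + PySem.Str.len l) j (by simpa using hi)
      have h0 := len_nonneg l
      simp only [accumLen, List.getD_cons_succ]
      omega

theorem takeCount_le (budget acc : Int) (ls : List String) :
    takeCount budget acc ls ≤ ls.length := by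
  induction ls generalizing acc with
  | nil => simp [takeCount]
  | cons l rest ih =>
    by_cases h : acc + PySem.Str.len l > budget
    · simp only [PySem.Str.len_eq, String.length_toList] at h
      simp [takeCount, h]
    · simp only [takeCount, if_neg h, List.length_cons]
      exact Nat.succ_le_succ (ih _)

theorem accumLen_low (budget acc : Int) (ls : List String) :
    ∀ i, i < takeCount budget acc ls → (accumLen acc ls).getD i 0 ≤ budget := by
  induction ls generalizing acc with
  | nil => simp [takeCount]
  | cons l rest ih =>
    intro i hi
    by_cases h : acc + PySem.Str.len l > budget
    · simp only [takeCount, if_pos h] at hi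
      omega
    · cases i with
      | zero => simpa [accumLen] using not_lt.mp h
      | succ j =>
        simp only [takeCount, if_neg h] at hi
        simpa [accumLen] using ih (acc + PySem.Str.len l) j (by omega)

theorem accumLen_high (budget acc : Int) (ls : List String) :
    ∀ i, takeCount budget acc ls ≤ i → i < ls.length →
      budget < (accumLen acc ls).getD i 0 := by
  induction ls generalizing acc with
  | nil => simp
  | cons l rest ih =>
    intro i hlo hhi
    by_cases h : acc + PySem.Str.len l > budget
    · -- every later prefix sum is ≥ acc + len l > budget
      cases i with
      | zero => simpa [accumLen] using h
      | succ j =>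
        have := accumLen_lb (acc + PySem.Str.len l) rest j (by simpa using hhi)
        simp only [accumLen, List.getD_cons_succ]
        omega
    · simp only [takeCount, if_neg h] at hlo
      cases i with
      | zero => omega
      | succ j =>
        simpa [accumLen] using ih (acc + PySem.Str.len l) j (by omega) (by simpa using hhi)

theorem bisectGo_eq (a : List Int) (x : Int) (n : Nat)
    (hlow : ∀ i, i < n → a.getD i 0 ≤ x)
    (hhigh : ∀ i, n ≤ i → i < a.length → x < a.getD i 0) :
    ∀ (d lo hi : Nat), hi - lo = d → lo ≤ n → n ≤ hi → hi ≤ a.length →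
      bisectGo a x lo hi = n := by
  intro d
  induction d using Nat.strong_induction_on with
  | _ d ih =>
    intro lo hi hd h1 h2 h3
    rw [bisectGo]
    by_cases hlt : lo < hi
    · simp only [dif_pos hlt]
      by_cases hx : x < a.getD ((lo + hi) / 2) 0
      · simp only [if_pos hx]
        have hn : n ≤ (lo + hi) / 2 := by
          by_contra hc
          exact absurd (hlow _ (by omega)) (not_le.mpr hx)
        exact ih ((lo + hi) / 2 - lo) (by omega) lo ((lo + hi) / 2) rfl h1 hn (by omega)
      · simp only [if_neg hx]
        have hn : (lo + hi) / 2 < n := by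
          by_contra hc
          exact hx (hhigh _ (by omega) (by omega))
        exact ih (hi - ((lo + hi) / 2 + 1)) (by omega) ((lo + hi) / 2 + 1) hi rfl (by omega) h2 h3
    · simp only [dif_neg hlt]
      omega

-- ===== VERDICT (by name: the statement is the Claim_ definition above) =====
theorem trim_lines_py_spec : Claim_equal_trim_lines_py := by
  intro lines budget _
  show trim_lines_py lines budget = trim_lines_py_alt lines budget
  have hcount :
      bisectGo (accumLen 0 lines) budget 0 (accumLen 0 lines).length
        = takeCount budget 0 lines := by
    refine bisectGo_eq (accumLen 0 lines) budget (takeCount budget 0 lines)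
      (accumLen_low budget 0 lines)
      (fun i h1 h2 => accumLen_high budget 0 lines i h1 (by simpa [accumLen_length] using h2))
      _ 0 (accumLen 0 lines).length rfl (Nat.zero_le _) ?_ le_rfl
    simpa [accumLen_length] using takeCount_le budget 0 lines
  simp [trim_lines_py, trim_lines_py_alt, trimLoop_eq_take, hcount]
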